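-- pv_equiv track=rewrite | github.com/andrwchu/ncss | Programs/orthologs2.py | combine_orth
-- ===== SOURCE A (Python) =====
-- def combine_orth(intr_orths):
-- 	# combine genes from the same species (list --> dict)
-- 	orth_dict = {}
-- 	for orth in intr_orths:
-- 		species = orth[0]
-- 		gene = orth[1]
-- 		if species not in orth_dict:
-- 			orth_dict[species] = []
-- 		orth_dict[species].append(gene)
--
-- 	intr_orths = orth_dict
-- 	if len(orth_dict.keys()) == 0:
-- 		intr_orths = None
--
-- 	return intr_orths
-- ===== SOURCE B (Python) =====
-- def combine_orth(intr_orths):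
-- 	# group genes per species: collect distinct species first, then gather each
-- 	# species' genes with one comprehension per species
-- 	seen = []
-- 	for species, _gene in intr_orths:
-- 		if species not in seen:
-- 			seen.append(species)
-- 	if not seen:
-- 		return None
-- 	return {s: [g for sp, g in intr_orths if sp == s] for s in seen}
-- ===== Notes on version B (the rewrite author's own statement) =====
-- stated objective: alternative
-- what changed: B first collects the distinct species in order of first occurrence, then builds each species' gene list with a per-species comprehension over the input (dict comprehension over the distinct keys), instead of A's single pass of conditional dict insertions and in-place appends.
import Mathlib
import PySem

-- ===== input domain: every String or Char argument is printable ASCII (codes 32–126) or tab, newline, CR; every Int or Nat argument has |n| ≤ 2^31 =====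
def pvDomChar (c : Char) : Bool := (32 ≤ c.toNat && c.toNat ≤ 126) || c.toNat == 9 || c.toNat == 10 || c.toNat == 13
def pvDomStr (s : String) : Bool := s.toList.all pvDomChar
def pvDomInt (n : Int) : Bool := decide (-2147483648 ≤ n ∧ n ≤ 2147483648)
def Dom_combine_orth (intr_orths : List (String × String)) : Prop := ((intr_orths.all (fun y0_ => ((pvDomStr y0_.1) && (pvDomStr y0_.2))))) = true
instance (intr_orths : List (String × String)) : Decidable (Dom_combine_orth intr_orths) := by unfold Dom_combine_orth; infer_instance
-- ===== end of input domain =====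

-- ===== PORT A =====
-- B groups by collecting distinct species then one filter per species; same value, different decomposition (objective: alternative).
def combine_orth (intr_orths : List (String × String)) : Option (List (String × List String)) :=
  let orth_dict : PySem.Dict String (List String) :=
    intr_orths.foldl (fun d orth =>
      let d := if d.contains orth.1 then d else d.insert orth.1 []
      d.modify orth.1 [] (fun l => l ++ [orth.2])) PySem.Dict.empty
  if orth_dict.keys.length == 0 then none else some orth_dict.items

-- ===== PORT B =====
def combine_orth_alt (intr_orths : List (String × String)) : Option (List (String × List String)) :=
  let seen : PySem.Set String :=
    intr_orths.foldl (fun s p => PySem.Set.add s p.1) PySem.Set.empty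
  if seen = [] then none
  else some (seen.map (fun s => (s, (intr_orths.filter (fun p => p.1 == s)).map (·.2))))

-- ===== PRECONDITION & SPEC =====
def Spec_combine_orth (intr_orths : List (String × String)) (out : Option (List (String × List String))) : Prop := out = combine_orth_alt intr_orths
instance (intr_orths : List (String × String)) (out : Option (List (String × List String))) : Decidable (Spec_combine_orth intr_orths out) := by unfold Spec_combine_orth; infer_instance

-- ===== CLAIM (what is proved, stated in full; the proofs are below) =====
def Claim_equal_combine_orth : Prop := ∀ (intr_orths : List (String × String)), Dom_combine_orth intr_orths → Spec_combine_orth intr_orths (combine_orth intr_orths)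

-- ===== LEMMAS AND PROOFS =====

-- A's "insert-if-absent then append" step is the same dict transformation as a plain modify with default [].
theorem step_eq_modify (d : PySem.Dict String (List String)) (k : String) (g : String) :
    (if d.contains k then d else d.insert k []).modify k [] (fun l => l ++ [g])
      = d.modify k [] (fun l => l ++ [g]) := by
  by_cases h : d.contains k
  · simp [h]
  · have h' : d.contains k = false := by simpa using h
    have hc : (d.items.any fun p => p.1 == k) = false := h'
    have hall : ∀ p ∈ d.items, ¬ p.1 = k := by
      intro p hp
      simpa using List.any_eq_false.mp hc p hp
    have hf : List.find? (fun p => p.1 == k) d.items = none := by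
      apply List.find?_eq_none.mpr
      intro p hp; simpa using hall p hp
    simp only [h', Bool.false_eq_true, if_false]
    simp [PySem.Dict.modify, PySem.Dict.insert, PySem.Dict.contains, PySem.Dict.getD,
      PySem.Dict.get?, hc, List.any_append, List.find?_append, hf]
    calc List.map (fun p => if p.1 = k then (k, ([] : List String) ++ [g]) else p) d.items
        = d.items.map id := List.map_congr_left (by intro p hp; simp [hall p hp])
      _ = d.items := List.map_id _

theorem foldA_eq_foldModify (l : List (String × String)) :
    (l.foldl (fun d orth =>
        let d := if d.contains orth.1 then d else d.insert orth.1 []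
        d.modify orth.1 [] (fun l => l ++ [orth.2])) PySem.Dict.empty)
      = l.foldl (fun d p => d.modify p.1 [] (fun l => l ++ [p.2])) PySem.Dict.empty := by
  have hfun : (fun (d : PySem.Dict String (List String)) (orth : String × String) =>
      let d := if d.contains orth.1 then d else d.insert orth.1 []
      d.modify orth.1 [] (fun l => l ++ [orth.2]))
      = fun d p => d.modify p.1 [] (fun l => l ++ [p.2]) := by
    funext d p
    exact step_eq_modify d p.1 p.2
  rw [hfun]

-- the distinct-first-keys list B builds is exactly the modify-fold's key list
theorem seen_eq_keys (l : List (String × String)) :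
    l.foldl (fun s p => PySem.Set.add s p.1) PySem.Set.empty
      = (l.foldl (fun d p => d.modify p.1 [] (fun l => l ++ [p.2])) PySem.Dict.empty).keys := by
  rw [PySem.Dict.keys_foldl_modify_key]
  show l.foldl (fun s p => PySem.Set.add s p.1) [] = PySem.Set.update [] (l.map Prod.fst)
  rw [PySem.Set.update_nil_left, PySem.Set.ofList_eq_foldl, List.foldl_map]

theorem keysA_eq (l : List (String × String)) :
    (l.foldl (fun d p => d.modify p.1 [] (fun l => l ++ [p.2])) PySem.Dict.empty).keys
      = PySem.Set.ofList (l.map Prod.fst) := by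
  rw [PySem.Dict.keys_foldl_modify_key]
  show PySem.Set.update ([] : PySem.Set String) (l.map Prod.fst) = _
  rw [PySem.Set.update_nil_left]

-- ===== VERDICT (by name: the statement is the Claim_ definition above) =====
theorem combine_orth_spec : Claim_equal_combine_orth := by
  intro l _
  show combine_orth l = combine_orth_alt l
  unfold combine_orth combine_orth_alt
  simp only [foldA_eq_foldModify, seen_eq_keys]
  cases l with
  | nil => rfl
  | cons p t =>
    have hkeys := keysA_eq (p :: t)
    have hmem : p.1 ∈ (((p :: t).foldl (fun d p => d.modify p.1 [] (fun l => l ++ [p.2]))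
        PySem.Dict.empty).keys) := by
      rw [hkeys]
      exact (PySem.Set.mem_ofList _ _).mpr (by simp)
    have hne : ((p :: t).foldl (fun d p => d.modify p.1 [] (fun l => l ++ [p.2]))
        PySem.Dict.empty).keys ≠ [] := by
      intro h0; rw [h0] at hmem; exact (List.not_mem_nil) hmem
    have hlen : (((p :: t).foldl (fun d p => d.modify p.1 [] (fun l => l ++ [p.2]))
        PySem.Dict.empty).keys.length == 0) = false := by
      cases hs : ((p :: t).foldl (fun d p => d.modify p.1 [] (fun l => l ++ [p.2]))
          PySem.Dict.empty).keys with
      | nil => exact absurd hs hne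
      | cons a s => rfl
    have hnodup : ((p :: t).foldl (fun d p => d.modify p.1 [] (fun l => l ++ [p.2]))
        PySem.Dict.empty).keys.Nodup :=
      PySem.Dict.nodup_keys_foldl_modify_key _ _ _ _ _ (by simp [PySem.Dict.empty])
    simp only [hlen, Bool.false_eq_true, if_false, hne]
    congr 1
    rw [PySem.Dict.items_eq_map_keys _ hnodup []]
    apply List.map_congr_left
    intro k _
    have hg := PySem.Dict.getD_foldl_modify_append (d := PySem.Dict.empty) (l := p :: t) (c := k)
    simp only [hg]
    simp [PySem.Dict.getD, PySem.Dict.get?, PySem.Dict.empty]
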